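-- pv_equiv track=rewrite | github.com/CCJK123/Advent-of-Code | year_2015/code/day_01.py | day_01
-- ===== SOURCE A (Python) =====
-- def day_01(input_str):
--     # Initial setup
--     outputs = []
--
--     # Part 1
--     outputs.append(input_str.count("(") - input_str.count(")"))
--
--     # Part 2
--     floor = 0
--     for position in range(len(input_str)):
--         if input_str[position] == "(":
--             floor += 1
--         else:
--             floor -= 1
--
--         if floor == -1:
--             outputs.append(position + 1)
--             break
--
--     return outputs
-- ===== SOURCE B (Python) =====
-- def day_01(input_str):
--     opens = 0
--     closes = 0
--     floor = 0
--     basement = None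
--     for position, ch in enumerate(input_str, 1):
--         if ch == "(":
--             opens += 1
--         elif ch == ")":
--             closes += 1
--         floor = floor + 1 if ch == "(" else floor - 1
--         if floor == -1 and basement is None:
--             basement = position
--     return [opens - closes] + ([basement] if basement is not None else [])
-- ===== Notes on version B (the rewrite author's own statement) =====
-- stated objective: alternative
-- what changed: Replaces A's two str.count passes plus a separate early-breaking index loop by one enumerate pass that tallies open and close parentheses for part 1, steps the floor (up on an open parenthesis, otherwise down) for part 2, and records the first basement position once without breaking.
import Mathlib
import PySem

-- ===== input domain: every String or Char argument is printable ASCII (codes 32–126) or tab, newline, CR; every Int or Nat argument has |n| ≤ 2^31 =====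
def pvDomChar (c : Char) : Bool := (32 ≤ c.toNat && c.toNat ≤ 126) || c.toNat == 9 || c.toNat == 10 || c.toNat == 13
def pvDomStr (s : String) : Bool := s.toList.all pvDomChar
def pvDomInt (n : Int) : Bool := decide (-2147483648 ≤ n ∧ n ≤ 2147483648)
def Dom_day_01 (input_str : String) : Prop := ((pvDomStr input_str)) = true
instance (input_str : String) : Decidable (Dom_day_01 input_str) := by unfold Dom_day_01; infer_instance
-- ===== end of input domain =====

-- B replaces A's two passes (str.count twice + an early-break index loop) by one
-- enumerate pass tallying opens/closes, stepping the floor, and recording the first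
-- basement position once (objective: alternative decomposition, same cost).


-- ===== PORT A =====
-- A's Part-2 loop: 'for position in range(len(...))' with an early break the first
-- time floor hits -1; returns the appended value (position + 1) if the break fires.
def day01Loop : List Char → Int → Int → Option Int
  | [], _, _ => none
  | c :: rest, floor, pos =>
    let floor' := if c = '(' then floor + 1 else floor - 1
    if floor' = -1 then some (pos + 1) else day01Loop rest floor' (pos + 1)

def day_01 (input_str : String) : List Int :=
  let outputs : List Int :=
    [((PySem.Str.count input_str "(" : Int) - (PySem.Str.count input_str ")" : Int))]
  match day01Loop input_str.toList 0 0 with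
  | none => outputs
  | some p => outputs ++ [p]

-- ===== PORT B =====
-- one step of B's single enumerate pass: state (opens, closes, floor, basement)
def day01AltStep (st : Int × Int × Int × Option Int) (pc : Int × Char) :
    Int × Int × Int × Option Int :=
  let (opens, closes, floor, basement) := st
  let (position, ch) := pc
  let (opens', closes') :=
    if ch = '(' then (opens + 1, closes)
    else if ch = ')' then (opens, closes + 1)
    else (opens, closes)
  let floor' := if ch = '(' then floor + 1 else floor - 1
  let basement' := if floor' = -1 ∧ basement = none then some position else basement
  (opens', closes', floor', basement')

def day_01_alt (input_str : String) : List Int :=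
  let st := (PySem.List.enumerate input_str.toList 1).foldl day01AltStep (0, 0, 0, none)
  match st with
  | (opens, closes, _, basement) =>
    [opens - closes] ++ (match basement with | none => [] | some b => [b])

-- ===== PRECONDITION & SPEC =====
def Spec_day_01 (input_str : String) (out : List Int) : Prop := out = day_01_alt input_str
instance (input_str : String) (out : List Int) : Decidable (Spec_day_01 input_str out) := by unfold Spec_day_01; infer_instance

-- ===== CLAIM (what is proved, stated in full; the proofs are below) =====
def Claim_equal_day_01 : Prop := ∀ (input_str : String), Dom_day_01 input_str → Spec_day_01 input_str (day_01 input_str)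

-- ===== LEMMAS AND PROOFS =====

-- single-character substring count is character count
theorem chars_count_go_single (c : Char) : ∀ (l : List Char) (fuel acc : Nat), l.length ≤ fuel →
    PySem.Chars.count.go [c] fuel l acc = acc + l.count c := by
  intro l
  induction l with
  | nil => intro fuel acc _; cases fuel <;> simp [PySem.Chars.count.go]
  | cons h t ih =>
    intro fuel acc hle
    cases fuel with
    | zero => simp at hle
    | succ f =>
      rw [PySem.Chars.count.go]
      by_cases hc : h = c
      · subst hc
        simp [List.isPrefixOf, ih f (acc + 1) (by simpa using hle), List.count_cons]
        omega
      · simp [List.isPrefixOf, hc, ih f acc (by simpa using hle), Ne.symm hc]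

theorem chars_count_single (cs : List Char) (c : Char) :
    PySem.Chars.count cs [c] = cs.count c := by
  simp [PySem.Chars.count, chars_count_go_single c cs cs.length 0 le_rfl]

-- net floor change of a character block: +1 per '(' , -1 per other character
def day01Net (cs : List Char) : Int := 2 * (cs.count '(' : Int) - cs.length

-- once basement is recorded, B's fold never changes it (and counters keep accumulating)
theorem foldB_some : ∀ (cs : List Char) (s opens closes floor b : Int),
    (PySem.List.enumerate cs s).foldl day01AltStep (opens, closes, floor, some b)
      = (opens + cs.count '(', closes + cs.count ')', floor + day01Net cs, some b) := by
  intro cs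
  induction cs with
  | nil => intro s o c f b; simp [PySem.List.enumerate_nil, day01Net]
  | cons h t ih =>
    intro s o c f b
    rw [PySem.List.enumerate_cons, List.foldl_cons]
    by_cases hc : h = '('
    · subst hc
      simp [day01AltStep, ih, day01Net, List.count_cons] <;> push_cast <;> omega
    · by_cases hc2 : h = ')'
      · subst hc2
        simp [day01AltStep, ih, day01Net, List.count_cons] <;> push_cast <;> omega
      · simp [day01AltStep, hc, hc2, ih, day01Net, List.count_cons, Ne.symm hc, Ne.symm hc2] <;> push_cast <;> omega

-- B's fold from a none-basement state (positions s+1, s+2, …) computes A's counters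
-- and A's loop result started at position s
theorem foldB_none : ∀ (cs : List Char) (s opens closes floor : Int),
    (PySem.List.enumerate cs (s + 1)).foldl day01AltStep (opens, closes, floor, none)
      = (opens + cs.count '(', closes + cs.count ')', floor + day01Net cs,
         day01Loop cs floor s) := by
  intro cs
  induction cs with
  | nil => intro s o c f; simp [PySem.List.enumerate_nil, day01Loop, day01Net]
  | cons h t ih =>
    intro s o c f
    rw [PySem.List.enumerate_cons, List.foldl_cons]
    by_cases hc : h = '('
    · subst hc
      by_cases hf : f + 1 = -1
      · simp [day01AltStep, hf, day01Loop, foldB_some, day01Net, List.count_cons] <;> push_cast <;> omega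
      · simp [day01AltStep, hf, day01Loop, ih, day01Net, List.count_cons] <;> push_cast <;> omega
    · by_cases hf : f - 1 = -1
      · by_cases hc2 : h = ')'
        · subst hc2
          simp [day01AltStep, hf, day01Loop, foldB_some, day01Net, List.count_cons] <;> push_cast <;> omega
        · simp [day01AltStep, hc, hc2, hf, day01Loop, foldB_some, day01Net,
                List.count_cons, Ne.symm hc, Ne.symm hc2] <;> push_cast <;> omega
      · by_cases hc2 : h = ')'
        · subst hc2
          simp [day01AltStep, hf, day01Loop, ih, day01Net, List.count_cons] <;> push_cast <;> omega
        · simp [day01AltStep, hc, hc2, hf, day01Loop, ih, day01Net,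
                List.count_cons, Ne.symm hc, Ne.symm hc2] <;> push_cast <;> omega

-- ===== VERDICT (by name: the statement is the Claim_ definition above) =====
theorem day_01_spec : Claim_equal_day_01 := by
  intro input_str _
  unfold Spec_day_01 day_01 day_01_alt
  have h := foldB_none input_str.toList 0 0 0 0
  norm_num at h
  rw [h]
  simp [PySem.Str.count_eq, chars_count_single]
  cases day01Loop input_str.toList 0 0 <;> simp
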